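-- pv_equiv track=rewrite | github.com/fabiocolacio/Overlap-AD | lib/helper.py | get_last_normal_MI
-- ===== SOURCE A (Python) =====
-- def get_last_normal_MI(MI_0, MI_1, MI_2):
-- 	index = 1
-- 	inverse = False
-- 	for i in range(1, len(MI_0)):
-- 		if(MI_0[i] < MI_1[i] and MI_1[i] < MI_2[i]):
-- 			index += 1
-- 			inverse = True
-- 		elif(inverse):
-- 			return index
-- 		else:
-- 			pass
-- 	return -1
-- ===== SOURCE B (Python) =====
-- def get_last_normal_MI(MI_0, MI_1, MI_2):
--     flags = [MI_0[i] < MI_1[i] < MI_2[i] for i in range(1, len(MI_0))]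
--     try:
--         f = flags.index(True)
--         return 1 + flags[f:].index(False)
--     except ValueError:
--         return -1
-- ===== Notes on version B (the rewrite author's own statement) =====
-- stated objective: simpler
-- what changed: The flag-driven scan with mutable index/inverse state is replaced by a declarative formulation: precompute the boolean condition list once, then locate the run boundaries with list.index(True) and a slice plus list.index(False) and return their arithmetic combination; no explicit loop or flag state remains.
-- outside the precondition, e.g. on get_last_normal_MI([0, 5], [1, 3], []): A returns -1, B returns -1; on get_last_normal_MI([0, 1, 5, 2], [1, 2, 3, 9], [2, 3]): A returns 2, B raises IndexError
import Mathlib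
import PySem

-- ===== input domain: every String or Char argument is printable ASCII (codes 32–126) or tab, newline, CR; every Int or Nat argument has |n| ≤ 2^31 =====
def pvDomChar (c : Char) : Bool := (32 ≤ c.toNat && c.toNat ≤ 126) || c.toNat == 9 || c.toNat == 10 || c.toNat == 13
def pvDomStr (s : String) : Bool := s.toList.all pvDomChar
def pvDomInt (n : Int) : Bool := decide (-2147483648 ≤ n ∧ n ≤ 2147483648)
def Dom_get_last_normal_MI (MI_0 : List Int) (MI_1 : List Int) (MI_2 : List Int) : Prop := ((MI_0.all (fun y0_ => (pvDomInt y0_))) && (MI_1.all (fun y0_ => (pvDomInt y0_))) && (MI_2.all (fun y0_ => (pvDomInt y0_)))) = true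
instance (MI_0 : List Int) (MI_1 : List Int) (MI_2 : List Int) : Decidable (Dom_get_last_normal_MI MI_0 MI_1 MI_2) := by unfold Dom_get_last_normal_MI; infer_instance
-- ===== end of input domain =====

-- Re-implementation: the flag-driven scan of A is replaced by a declarative version — the
-- condition list is precomputed once and the run boundaries found with index/slice (simpler).


-- ===== PORT A =====
-- A's loop: i from 1, mutable `index` and `inverse`; under Pre_ all accessed indices
-- are in range, so xs[i] is ported as getD (exact there).
def goA (MI_0 : List Int) (MI_1 : List Int) (MI_2 : List Int) (i : Nat) (index : Int) (inverse : Bool) : Int :=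
  if i < MI_0.length then
    if MI_0.getD i 0 < MI_1.getD i 0 ∧ MI_1.getD i 0 < MI_2.getD i 0 then
      goA MI_0 MI_1 MI_2 (i + 1) (index + 1) true
    else if inverse then index
    else goA MI_0 MI_1 MI_2 (i + 1) index inverse
  else -1
termination_by MI_0.length - i

def get_last_normal_MI (MI_0 : List Int) (MI_1 : List Int) (MI_2 : List Int) : Int :=
  goA MI_0 MI_1 MI_2 1 1 false

-- ===== PORT B =====
-- B: flags = [MI_0[i] < MI_1[i] < MI_2[i] for i in range(1, len(MI_0))], then
-- 1 + flags[f:].index(False) where f = flags.index(True); ValueError (= none) gives -1.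
-- Under Pre_ all accessed indices are in range, so xs[i] is ported as pyGetD (exact there).
def get_last_normal_MI_alt (MI_0 : List Int) (MI_1 : List Int) (MI_2 : List Int) : Int :=
  let flags := (PySem.List.pyRange 1 (MI_0.length : Int) 1).map
    (fun i => decide (PySem.List.pyGetD MI_0 i 0 < PySem.List.pyGetD MI_1 i 0) &&
              decide (PySem.List.pyGetD MI_1 i 0 < PySem.List.pyGetD MI_2 i 0))
  match PySem.List.index? flags true with
  | none => -1
  | some f =>
    match PySem.List.index? (PySem.List.slice flags (some (f : Int)) none) false with
    | none => -1
    | some e => 1 + (e : Int)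

-- ===== PRECONDITION & SPEC =====
-- Pre_ excludes inputs where MI_1 or MI_2 is shorter than MI_0 (unless the loop is empty):
-- there the scan can run off the end of MI_1/MI_2 with IndexError; on some such inputs A
-- happens to return early before the out-of-range access, where B may also raise IndexError.
def Pre_get_last_normal_MI (MI_0 : List Int) (MI_1 : List Int) (MI_2 : List Int) : Prop :=
  MI_0.length ≤ 1 ∨ (MI_0.length ≤ MI_1.length ∧ MI_0.length ≤ MI_2.length)
instance (MI_0 : List Int) (MI_1 : List Int) (MI_2 : List Int) : Decidable (Pre_get_last_normal_MI MI_0 MI_1 MI_2) := by unfold Pre_get_last_normal_MI; infer_instance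

def pvWitness_get_last_normal_MI : List Int × List Int × List Int := ([0, 1, 2], [1, 2, 3], [2, 3, 1])

def Spec_get_last_normal_MI (MI_0 : List Int) (MI_1 : List Int) (MI_2 : List Int) (out : Int) : Prop := out = get_last_normal_MI_alt MI_0 MI_1 MI_2
instance (MI_0 : List Int) (MI_1 : List Int) (MI_2 : List Int) (out : Int) : Decidable (Spec_get_last_normal_MI MI_0 MI_1 MI_2 out) := by unfold Spec_get_last_normal_MI; infer_instance

-- ===== CLAIM =====
def Claim_equal_get_last_normal_MI : Prop := ∀ (MI_0 : List Int) (MI_1 : List Int) (MI_2 : List Int), Dom_get_last_normal_MI MI_0 MI_1 MI_2 → Pre_get_last_normal_MI MI_0 MI_1 MI_2 → Spec_get_last_normal_MI MI_0 MI_1 MI_2 (get_last_normal_MI MI_0 MI_1 MI_2)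

-- ===== LEMMAS AND PROOFS =====

-- the per-index condition, as a Nat-indexed Bool
def condC (MI_0 : List Int) (MI_1 : List Int) (MI_2 : List Int) (i : Nat) : Bool :=
  decide (MI_0.getD i 0 < MI_1.getD i 0) && decide (MI_1.getD i 0 < MI_2.getD i 0)

-- intermediate two-phase form of A's loop
def findFirstB (MI_0 : List Int) (MI_1 : List Int) (MI_2 : List Int) (i : Nat) : Option Nat :=
  if i < MI_0.length then
    if condC MI_0 MI_1 MI_2 i then some i else findFirstB MI_0 MI_1 MI_2 (i + 1)
  else none
termination_by MI_0.length - i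

def countRunB (MI_0 : List Int) (MI_1 : List Int) (MI_2 : List Int) (i : Nat) (run : Int) : Int :=
  if i < MI_0.length then
    if condC MI_0 MI_1 MI_2 i then countRunB MI_0 MI_1 MI_2 (i + 1) (run + 1) else 1 + run
  else -1
termination_by MI_0.length - i

lemma condC_iff (MI_0 MI_1 MI_2 : List Int) (i : Nat) :
    condC MI_0 MI_1 MI_2 i = true ↔
      (MI_0.getD i 0 < MI_1.getD i 0 ∧ MI_1.getD i 0 < MI_2.getD i 0) := by
  simp [condC]

lemma goA_true_eq_countRun (MI_0 MI_1 MI_2 : List Int) :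
    ∀ fuel i run, MI_0.length ≤ i + fuel →
      goA MI_0 MI_1 MI_2 i (run + 1) true = countRunB MI_0 MI_1 MI_2 i run := by
  intro fuel
  induction fuel with
  | zero =>
    intro i run h
    have hni : ¬ i < MI_0.length := by omega
    rw [goA, countRunB]
    simp [hni]
  | succ n ih =>
    intro i run h
    rw [goA, countRunB]
    by_cases hi : i < MI_0.length
    · simp only [hi, if_true]
      by_cases hc : MI_0.getD i 0 < MI_1.getD i 0 ∧ MI_1.getD i 0 < MI_2.getD i 0
      · rw [if_pos hc, if_pos ((condC_iff ..).mpr hc)]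
        exact ih (i + 1) (run + 1) (by omega)
      · rw [if_neg hc, if_neg (fun h => hc ((condC_iff ..).mp h))]
        ring
    · simp [hi]

lemma goA_false_eq_phases (MI_0 MI_1 MI_2 : List Int) :
    ∀ fuel i, MI_0.length ≤ i + fuel →
      goA MI_0 MI_1 MI_2 i 1 false =
        (match findFirstB MI_0 MI_1 MI_2 i with
         | none => -1
         | some f => countRunB MI_0 MI_1 MI_2 (f + 1) 1) := by
  intro fuel
  induction fuel with
  | zero =>
    intro i h
    rw [goA, findFirstB]
    simp [Nat.not_lt.mpr (by omega : MI_0.length ≤ i)]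
  | succ n ih =>
    intro i h
    rw [goA, findFirstB]
    by_cases hi : i < MI_0.length
    · simp only [hi, if_true]
      by_cases hc : MI_0.getD i 0 < MI_1.getD i 0 ∧ MI_1.getD i 0 < MI_2.getD i 0
      · rw [if_pos hc, if_pos ((condC_iff ..).mpr hc)]
        have h2 := goA_true_eq_countRun MI_0 MI_1 MI_2 n (i + 1) 1 (by omega)
        simpa using h2
      · rw [if_neg hc, if_neg (fun h => hc ((condC_iff ..).mp h))]
        exact ih (i + 1) (by omega)
    · simp [hi]

-- flag-list cons step used by both bridges
lemma flags_range_succ (c : Nat → Bool) (m : Nat) (i : Nat) :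
    (List.range (m+1)).map (fun k => c (i + k)) =
      c i :: (List.range m).map (fun k => c (i + 1 + k)) := by
  rw [List.range_succ_eq_map]
  simp [Function.comp, Nat.add_comm, Nat.add_left_comm]

-- bridge 1: findFirstB as index? over the flag list
lemma findFirst_eq_index (MI_0 MI_1 MI_2 : List Int) :
    ∀ m i, i + m = MI_0.length →
      findFirstB MI_0 MI_1 MI_2 i =
        (match PySem.List.index? ((List.range m).map (fun k => condC MI_0 MI_1 MI_2 (i + k))) true with
         | none => none
         | some k => some (i + k)) := by
  intro m
  induction m with
  | zero =>
    intro i h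
    rw [findFirstB]
    simp [PySem.List.index?, Nat.not_lt.mpr (by omega : MI_0.length ≤ i)]
  | succ n ih =>
    intro i h
    rw [findFirstB, flags_range_succ]
    have hi : i < MI_0.length := by omega
    by_cases hc : condC MI_0 MI_1 MI_2 i = true
    · rw [hc, PySem.List.index?_cons_self]
      simp [hi]
    · have hne : condC MI_0 MI_1 MI_2 i ≠ true := hc
      rw [PySem.List.index?_cons_of_ne _ hne, if_pos hi, if_neg hc, ih (i+1) (by omega)]
      cases PySem.List.index? ((List.range n).map (fun k => condC MI_0 MI_1 MI_2 (i + 1 + k))) true with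
      | none => simp
      | some k => simp; omega

-- bridge 2: countRunB as index? over the flag list
lemma countRun_eq_index (MI_0 MI_1 MI_2 : List Int) :
    ∀ m i run, i + m = MI_0.length →
      countRunB MI_0 MI_1 MI_2 i run =
        (match PySem.List.index? ((List.range m).map (fun k => condC MI_0 MI_1 MI_2 (i + k))) false with
         | none => -1
         | some e => 1 + run + (e : Int)) := by
  intro m
  induction m with
  | zero =>
    intro i run h
    rw [countRunB]
    simp [PySem.List.index?, Nat.not_lt.mpr (by omega : MI_0.length ≤ i)]
  | succ n ih =>
    intro i run h
    rw [countRunB, flags_range_succ]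
    have hi : i < MI_0.length := by omega
    by_cases hc : condC MI_0 MI_1 MI_2 i = true
    · have hne : condC MI_0 MI_1 MI_2 i ≠ false := by simp [hc]
      rw [PySem.List.index?_cons_of_ne _ hne, if_pos hi, if_pos hc,
          ih (i+1) (run+1) (by omega)]
      cases PySem.List.index? ((List.range n).map (fun k => condC MI_0 MI_1 MI_2 (i + 1 + k))) false with
      | none => simp
      | some e => simp; ring
    · have hf : condC MI_0 MI_1 MI_2 i = false := by simpa using hc
      rw [hf, PySem.List.index?_cons_self, if_pos hi]
      simp

lemma drop_map_range (g : Nat → Bool) (m d : Nat) :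
    ((List.range m).map g).drop d = (List.range (m - d)).map (fun k => g (d + k)) := by
  apply List.ext_getElem
  · simp
  · intro i h1 h2
    simp

-- ===== VERDICT =====
theorem get_last_normal_MI_spec : Claim_equal_get_last_normal_MI := by
  intro MI_0 MI_1 MI_2 _ _
  unfold Spec_get_last_normal_MI get_last_normal_MI get_last_normal_MI_alt
  by_cases hn : MI_0.length = 0
  · have h0 : PySem.List.pyRange 1 (MI_0.length : Int) 1 = [] :=
      PySem.List.pyRange_one_eq_nil (by omega)
    rw [goA, if_neg (by omega), h0]
    rfl
  · have hflags : (PySem.List.pyRange 1 (MI_0.length : Int) 1).map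
        (fun i => decide (PySem.List.pyGetD MI_0 i 0 < PySem.List.pyGetD MI_1 i 0) &&
                  decide (PySem.List.pyGetD MI_1 i 0 < PySem.List.pyGetD MI_2 i 0)) =
        (List.range (MI_0.length - 1)).map (fun k => condC MI_0 MI_1 MI_2 (1 + k)) := by
      rw [PySem.List.pyRange_one, List.map_map]
      have hm : ((MI_0.length : Int) - 1).toNat = MI_0.length - 1 := by omega
      rw [hm]
      apply List.map_congr_left
      intro k _
      have hcast : (1 : Int) + (k : Int) = ((1 + k : Nat) : Int) := by push_cast; ring
      rw [Function.comp_apply, hcast, PySem.List.pyGetD_natCast, PySem.List.pyGetD_natCast,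
          PySem.List.pyGetD_natCast, condC]
    rw [goA_false_eq_phases MI_0 MI_1 MI_2 MI_0.length 1 (by omega),
        findFirst_eq_index MI_0 MI_1 MI_2 (MI_0.length - 1) 1 (by omega)]
    simp only [hflags]
    cases hT : PySem.List.index?
        ((List.range (MI_0.length - 1)).map (fun k => condC MI_0 MI_1 MI_2 (1 + k))) true with
    | none => simp
    | some f =>
      simp only []
      obtain ⟨hk, hval, -⟩ := PySem.List.getElem_of_index?_eq_some hT
      have hfn : f < MI_0.length - 1 := by simpa using hk
      rw [PySem.List.slice_from_natCast]
      have hdrop : ((List.range (MI_0.length - 1)).map (fun k => condC MI_0 MI_1 MI_2 (1 + k))).drop f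
          = true :: ((List.range (MI_0.length - 1)).map (fun k => condC MI_0 MI_1 MI_2 (1 + k))).drop (f + 1) := by
        rw [List.drop_eq_getElem_cons hk, hval]
      rw [hdrop, PySem.List.index?_cons_of_ne _ (by simp : (true : Bool) ≠ false),
          drop_map_range]
      have hfun : (fun k => condC MI_0 MI_1 MI_2 (1 + (f + 1 + k)))
          = (fun k => condC MI_0 MI_1 MI_2 (f + 2 + k)) := by
        funext k; congr 1; omega
      have h12 : 1 + f + 1 = f + 2 := by omega
      rw [hfun, h12,
          countRun_eq_index MI_0 MI_1 MI_2 (MI_0.length - 1 - (f + 1)) (f + 2) 1 (by omega)]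
      cases PySem.List.index?
          ((List.range (MI_0.length - 1 - (f + 1))).map (fun k => condC MI_0 MI_1 MI_2 (f + 2 + k))) false with
      | none => simp
      | some e => simp; ring
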